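-- pv_equiv track=rewrite | github.com/lukiiimohhU/continental | backend/game_logic.py | sort_run_cards
-- ===== SOURCE A (Python) =====
-- from typing import List, Dict, Optional, Tuple
--
-- def get_rank_value(rank: str) -> int:
--     rank_values = {
--         'A': 1, '2': 2, '3': 3, '4': 4, '5': 5, '6': 6, '7': 7,
--         '8': 8, '9': 9, '10': 10, 'J': 11, 'Q': 12, 'K': 13
--     }
--     return rank_values.get(rank, 0)
--
-- def sort_run_cards(cards: List[Dict]) -> List[Dict]:
--     """Sort run cards maintaining joker positions"""
--     normal_cards = [c for c in cards if not c['is_joker']]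
--     jokers = [c for c in cards if c['is_joker']]
--
--     if not normal_cards:
--         return cards
--
--     normal_values = [get_rank_value(c['rank']) for c in normal_cards]
--
--     # Check if cyclic
--     has_high = any(v >= 11 for v in normal_values)
--     has_ace = 1 in normal_values
--
--     value_to_card = {}
--     for card in normal_cards:
--         val = get_rank_value(card['rank'])
--         if has_high and val == 1:
--             value_to_card[14] = card
--         else:
--             value_to_card[val] = card
--
--     sorted_values = sorted(value_to_card.keys())
--
--     result = []
--     all_positions = list(range(sorted_values[0], sorted_values[-1] + 1))
--
--     joker_idx = 0
--     for pos in all_positions: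
--         if pos in value_to_card:
--             result.append(value_to_card[pos])
--         elif joker_idx < len(jokers):
--             result.append(jokers[joker_idx])
--             joker_idx += 1
--
--     while joker_idx < len(jokers):
--         result.append(jokers[joker_idx])
--         joker_idx += 1
--
--     return result
-- ===== SOURCE B (Python) =====
-- def get_rank_value(rank: str) -> int:
--     rank_values = {
--         'A': 1, '2': 2, '3': 3, '4': 4, '5': 5, '6': 6, '7': 7,
--         '8': 8, '9': 9, '10': 10, 'J': 11, 'Q': 12, 'K': 13
--     }
--     return rank_values.get(rank, 0)
--
-- def sort_run_cards(cards):
--     """Sort run cards, filling value gaps between consecutive sorted cards with jokers."""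
--     jokers = [c for c in cards if c['is_joker']]
--     normal_cards = [c for c in cards if not c['is_joker']]
--     if not normal_cards:
--         return cards
--     has_high = any(get_rank_value(c['rank']) >= 11 for c in normal_cards)
--     value_to_card = {}
--     for card in normal_cards:
--         val = get_rank_value(card['rank'])
--         value_to_card[14 if (has_high and val == 1) else val] = card
--     items = sorted(value_to_card.items(), key=lambda kv: kv[0])
--     (prev, first), rest = items[0], items[1:]
--     result = [first]
--     remaining = jokers
--     for val, card in rest:
--         take = min(val - prev - 1, len(remaining))
--         result.extend(remaining[:take])
--         remaining = remaining[take:]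
--         result.append(card)
--         prev = val
--     result.extend(remaining)
--     return result
-- ===== Notes on version B (the rewrite author's own statement) =====
-- stated objective: alternative
-- what changed: A scans every integer position in range(min,max+1) testing dict membership at each; B walks only the sorted (value, card) items pairwise, computing each gap size arithmetically and consuming that many jokers from the front of a remaining-jokers list.
import Mathlib
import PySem

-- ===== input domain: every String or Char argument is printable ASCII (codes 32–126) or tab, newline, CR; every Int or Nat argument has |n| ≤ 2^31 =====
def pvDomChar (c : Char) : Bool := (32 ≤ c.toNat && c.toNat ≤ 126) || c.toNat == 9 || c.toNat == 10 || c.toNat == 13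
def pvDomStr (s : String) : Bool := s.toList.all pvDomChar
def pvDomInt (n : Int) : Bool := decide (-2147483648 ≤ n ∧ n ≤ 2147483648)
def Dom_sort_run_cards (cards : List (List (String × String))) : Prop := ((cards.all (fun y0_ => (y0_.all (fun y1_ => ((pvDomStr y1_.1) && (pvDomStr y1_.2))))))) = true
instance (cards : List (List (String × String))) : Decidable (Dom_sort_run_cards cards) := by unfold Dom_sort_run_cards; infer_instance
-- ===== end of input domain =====

-- B replaces A's scan over every integer position in range(min,max+1) (membership test per
-- position) by a pairwise walk over the sorted (value, card) items, computing each gap size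
-- arithmetically and slicing that many jokers off a remaining-jokers list (objective: alternative).

-- ===== PORT A =====
-- shared helper of the Python module
def get_rank_value (rank : String) : Int :=
  PySem.Dict.getD (PySem.Dict.ofList
    [("A", (1:Int)), ("2", 2), ("3", 3), ("4", 4), ("5", 5), ("6", 6), ("7", 7),
     ("8", 8), ("9", 9), ("10", 10), ("J", 11), ("Q", 12), ("K", 13)]) rank 0

-- c['is_joker'] truthiness (value is a string: truthy iff non-empty); exact under Pre_ (key present)
def pvIsJoker (c : List (String × String)) : Bool :=
  !((PySem.Dict.mk c).getD "is_joker" "" == "")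

-- c['rank']; exact under Pre_ (key present on every non-joker card)
def pvRank (c : List (String × String)) : String :=
  (PySem.Dict.mk c).getD "rank" ""

-- the body of A's `for pos in all_positions` loop; joker_idx is a Nat (Python keeps it ≥ 0 and
-- the access jokers[joker_idx] is guarded by joker_idx < len(jokers), so getD is exact)
def pvStepA (d : PySem.Dict Int (List (String × String))) (jokers : List (List (String × String)))
    (st : List (List (String × String)) × Nat) (pos : Int) :
    List (List (String × String)) × Nat :=
  if d.contains pos then (st.1 ++ [d.getD pos []], st.2)
  else if st.2 < jokers.length then (st.1 ++ [jokers.getD st.2 []], st.2 + 1)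
  else st

-- A's trailing `while joker_idx < len(jokers)` loop
def pvWhileJokers (jokers : List (List (String × String)))
    (res : List (List (String × String))) (ji : Nat) : List (List (String × String)) :=
  if ji < jokers.length then pvWhileJokers jokers (res ++ [jokers.getD ji []]) (ji + 1)
  else res
termination_by jokers.length - ji

def sort_run_cards (cards : List (List (String × String))) : List (List (String × String)) :=
  let normal_cards := cards.filter (fun c => !(pvIsJoker c))
  let jokers := cards.filter (fun c => pvIsJoker c)
  if normal_cards = [] then cards else
  let normal_values := normal_cards.map (fun c => get_rank_value (pvRank c))
  let has_high := normal_values.any (fun v => decide (11 ≤ v))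
  -- Python also computes has_ace here but never uses it; the dead binding is omitted
  let value_to_card := normal_cards.foldl (fun d card =>
      let val := get_rank_value (pvRank card)
      if has_high && (val == 1) then d.insert 14 card else d.insert val card)
    PySem.Dict.empty
  let sorted_values := PySem.List.sorted value_to_card.keys (fun x => x) false
  let all_positions := PySem.List.pyRange (PySem.List.pyGetD sorted_values 0 0)
      ((PySem.List.pyGetD sorted_values (-1) 0) + 1) 1
  let st := all_positions.foldl (pvStepA value_to_card jokers) ([], 0)
  pvWhileJokers jokers st.1 st.2

-- ===== PORT B =====
-- B's `for val, card in rest` loop: fill the gap from the remaining jokers, then emit the card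
def pvBLoop (rest : List (Int × List (String × String))) (prev : Int)
    (remaining : List (List (String × String))) (result : List (List (String × String))) :
    List (List (String × String)) :=
  match rest with
  | [] => result ++ remaining
  | (val, card) :: rs =>
      let take : Int := min (val - prev - 1) (PySem.List.len remaining)
      pvBLoop rs val (PySem.List.slice remaining (some take) none)
        (result ++ PySem.List.slice remaining none (some take) ++ [card])

def sort_run_cards_alt (cards : List (List (String × String))) : List (List (String × String)) :=
  let jokers := cards.filter (fun c => pvIsJoker c)
  let normal_cards := cards.filter (fun c => !(pvIsJoker c))
  if normal_cards = [] then cards else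
  let has_high := normal_cards.any (fun c => decide (11 ≤ get_rank_value (pvRank c)))
  let value_to_card := normal_cards.foldl (fun d card =>
      let val := get_rank_value (pvRank card)
      d.insert (if has_high && (val == 1) then 14 else val) card)
    PySem.Dict.empty
  match PySem.List.sorted value_to_card.items (fun kv => kv.1) false with
  | [] => cards  -- unreachable: value_to_card is nonempty when normal_cards ≠ []
  | (prev, first) :: rest => pvBLoop rest prev jokers [first]

-- ===== PRECONDITION & SPEC =====
-- Pre_ excludes exactly the inputs where Python A raises KeyError: a card without an
-- 'is_joker' key, or a non-joker card (falsy 'is_joker') without a 'rank' key.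
def Pre_sort_run_cards (cards : List (List (String × String))) : Prop :=
  ∀ c ∈ cards, (PySem.Dict.mk c).contains "is_joker" = true ∧
    ((PySem.Dict.mk c).getD "is_joker" "" = "" → (PySem.Dict.mk c).contains "rank" = true)
instance (cards : List (List (String × String))) : Decidable (Pre_sort_run_cards cards) := by
  unfold Pre_sort_run_cards; infer_instance

def pvWitness_sort_run_cards : (List (List (String × String))) :=
  [[("is_joker", ""), ("rank", "5")], [("is_joker", "x")], [("is_joker", ""), ("rank", "8")]]

def Spec_sort_run_cards (cards : List (List (String × String)))
    (out : List (List (String × String))) : Prop := out = sort_run_cards_alt cards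
instance (cards : List (List (String × String))) (out : List (List (String × String))) :
    Decidable (Spec_sort_run_cards cards out) := by unfold Spec_sort_run_cards; infer_instance

-- ===== CLAIM (what is proved, stated in full; the proofs are below) =====
def Claim_equal_sort_run_cards : Prop := ∀ (cards : List (List (String × String))),
  Dom_sort_run_cards cards → Pre_sort_run_cards cards →
  Spec_sort_run_cards cards (sort_run_cards cards)

-- ===== LEMMAS AND PROOFS =====

-- A's trailing while loop appends the unused jokers
lemma whileJokers_eq (jokers : List (List (String × String))) :
    ∀ (ji : Nat) (res : List (List (String × String))),
      pvWhileJokers jokers res ji = res ++ jokers.drop ji := by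
  intro ji res
  induction res, ji using pvWhileJokers.induct jokers with
  | case1 res ji h ih =>
      rw [pvWhileJokers, if_pos h, ih]
      rw [List.drop_eq_getElem_cons h]
      simp [List.getD_eq_getElem?_getD, List.getElem?_eq_getElem h]
  | case2 res ji h =>
      rw [pvWhileJokers, if_neg h, List.drop_eq_nil_of_le (by omega), List.append_nil]

-- the fold over a run of positions absent from the dict consumes jokers (clamped take)
lemma gap_fold (d : PySem.Dict Int (List (String × String)))
    (jokers : List (List (String × String))) :
    ∀ (ps : List Int) (res : List (List (String × String))) (ji : Nat),
      ji ≤ jokers.length → (∀ p ∈ ps, d.contains p = false) →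
      ps.foldl (pvStepA d jokers) (res, ji) =
        (res ++ (jokers.drop ji).take ps.length, min (ji + ps.length) jokers.length) := by
  intro ps
  induction ps with
  | nil => intro res ji hji _; simp; omega
  | cons p ps ih =>
      intro res ji hji hc
      have hcp : d.contains p = false := hc p (List.mem_cons_self ..)
      rw [List.foldl_cons]
      by_cases h : ji < jokers.length
      · rw [show pvStepA d jokers (res, ji) p = (res ++ [jokers.getD ji []], ji + 1) by
          simp [pvStepA, hcp, h]]
        rw [ih _ _ (by omega) (fun q hq => hc q (List.mem_cons_of_mem _ hq))]
        have hd : jokers.drop ji = jokers[ji] :: jokers.drop (ji + 1) :=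
          List.drop_eq_getElem_cons h
        rw [hd]
        refine Prod.ext ?_ (by simp; omega)
        simp [List.getD_eq_getElem?_getD, List.getElem?_eq_getElem h]
        rw [hd, List.take_succ_cons]
      · rw [show pvStepA d jokers (res, ji) p = (res, ji) by simp [pvStepA, hcp, h]]
        rw [ih _ _ hji (fun q hq => hc q (List.mem_cons_of_mem _ hq))]
        have : ji = jokers.length := by omega
        subst this
        simp

lemma le_getLastD (l : List Int) (v : Int) (h : ∀ x ∈ l, v ≤ x) : v ≤ l.getLastD v := by
  rcases List.mem_cons.mp (List.getLastD_mem_cons (l := l) (a := v)) with h1 | h1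
  · omega
  · exact h _ h1

-- main loop correspondence: A's position scan from k+1 to the last key equals B's pairwise walk
lemma loop_eq (d : PySem.Dict Int (List (String × String)))
    (jokers : List (List (String × String))) :
    ∀ (items : List (Int × List (String × String))) (k : Int)
      (res : List (List (String × String))) (ji : Nat),
      ji ≤ jokers.length →
      (k :: items.map (·.1)).Pairwise (· < ·) →
      (∀ pv ∈ items, d.get? pv.1 = some pv.2) →
      (∀ p : Int, k < p → d.contains p = decide (p ∈ items.map (·.1))) →
      (let st := (PySem.List.pyRange (k+1) (((items.map (·.1)).getLastD k) + 1) 1).foldl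
          (pvStepA d jokers) (res, ji)
       st.1 ++ jokers.drop st.2) = pvBLoop items k (jokers.drop ji) res := by
  intro items
  induction items with
  | nil =>
      intro k res ji hji _ _ _
      simp [PySem.List.pyRange_one_eq_nil (le_refl (k+1)), pvBLoop]
  | cons vc rs ih =>
      obtain ⟨v, c⟩ := vc
      intro k res ji hji hsort hget hcon
      have hkv : k < v := (List.pairwise_cons.mp hsort).1 v (by simp)
      have hsort' : (v :: rs.map (·.1)).Pairwise (· < ·) := (List.pairwise_cons.mp hsort).2
      have hvall : ∀ x ∈ rs.map (·.1), v < x := (List.pairwise_cons.mp hsort').1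
      have hlast : (((v, c) :: rs).map (·.1)).getLastD k = (rs.map (·.1)).getLastD v := by
        rw [List.map_cons, List.getLastD_cons]
      have hvL : v ≤ (rs.map (·.1)).getLastD v :=
        le_getLastD _ _ (fun x hx => le_of_lt (hvall x hx))
      set L := (rs.map (·.1)).getLastD v with hL
      rw [hlast, PySem.List.pyRange_one_append (k+1) v (L+1) (by omega) (by omega),
        List.foldl_append]
      have hgap : ∀ p ∈ PySem.List.pyRange (k+1) v 1, d.contains p = false := by
        intro p hp
        rw [PySem.List.mem_pyRange_one] at hp
        rw [hcon p (by omega)]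
        simp only [decide_eq_false_iff_not]
        intro hmem
        rw [List.map_cons] at hmem
        rcases List.mem_cons.mp hmem with h1 | h1
        · omega
        · exact absurd (hvall p h1) (by omega)
      rw [gap_fold d jokers _ res ji hji hgap]
      set g := (PySem.List.pyRange (k+1) v 1).length with hg
      have hglen : g = (v - k - 1).toNat := by
        rw [hg, PySem.List.length_pyRange_one]; congr 1; omega
      rw [PySem.List.pyRange_one_cons (by omega : v < L + 1), List.foldl_cons]
      have hconv : d.contains v = true := by
        rw [hcon v hkv]; simp
      have hgetv : d.getD v [] = c := by
        have h := hget (v, c) (List.mem_cons_self ..)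
        simp [PySem.Dict.getD_eq_get?_getD, h]
      rw [show pvStepA d jokers
            (res ++ (jokers.drop ji).take g, min (ji + g) jokers.length) v =
          (res ++ (jokers.drop ji).take g ++ [c], min (ji + g) jokers.length) by
        simp [pvStepA, hconv, hgetv]]
      rw [ih v (res ++ (jokers.drop ji).take g ++ [c]) (min (ji + g) jokers.length)
        (by omega) hsort' (fun pv hpv => hget pv (List.mem_cons_of_mem _ hpv))
        (fun p hp => by
          rw [hcon p (by omega), List.map_cons, decide_eq_decide, List.mem_cons]
          exact ⟨fun h => h.resolve_left (by omega), Or.inr⟩)]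
      show pvBLoop rs v (jokers.drop (min (ji + g) jokers.length)) _ = _
      rw [pvBLoop]
      have hrem : (jokers.drop ji).length = jokers.length - ji := by simp
      set t : Int := min (v - k - 1) (PySem.List.len (jokers.drop ji)) with ht
      have ht0 : 0 ≤ t := by
        rw [ht]; simp [PySem.List.len_eq]; omega
      have httoNat : t.toNat = min (v - k - 1).toNat (jokers.length - ji) := by
        rw [ht]; simp [PySem.List.len_eq, hrem]; omega
      rw [PySem.List.slice_to _ ht0, PySem.List.slice_from _ ht0]
      congr 1
      · rw [List.drop_drop, httoNat]
        congr 1; omega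
      · congr 2
        rw [httoNat, hglen, ← hrem, ← List.take_eq_take_min]

lemma pairwise_lt_of_le_nodup (l : List Int) (h1 : l.Pairwise (· ≤ ·)) (h2 : l.Nodup) :
    l.Pairwise (· < ·) := by
  have := List.Pairwise.and h1 h2
  exact this.imp (by rintro a b ⟨hle, hne⟩; omega)

-- ===== VERDICT (by name: the statement is the Claim_ definition above) =====
theorem sort_run_cards_spec : Claim_equal_sort_run_cards := by
  intro cards _hdom _hpre
  unfold Spec_sort_run_cards
  simp only [sort_run_cards, sort_run_cards_alt]
  by_cases hn : cards.filter (fun c => !(pvIsJoker c)) = []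
  · rw [if_pos hn, if_pos hn]
  · rw [if_neg hn, if_neg hn]
    set normal := cards.filter (fun c => !(pvIsJoker c)) with hnormal
    set jokers := cards.filter (fun c => pvIsJoker c) with hjokers
    -- the two ports compute the same has_high flag
    have hhigh : (normal.map (fun c => get_rank_value (pvRank c))).any (fun v => decide (11 ≤ v))
        = normal.any (fun c => decide (11 ≤ get_rank_value (pvRank c))) := by
      rw [List.any_map]; rfl
    rw [hhigh]
    set hh := normal.any (fun c => decide (11 ≤ get_rank_value (pvRank c))) with hhh
    set key : List (String × String) → Int := fun card =>
      if hh && (get_rank_value (pvRank card) == 1) then 14 else get_rank_value (pvRank card)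
      with hkey
    -- both ports build the same dict
    have hfold : (fun (d : PySem.Dict Int (List (String × String))) card =>
          let val := get_rank_value (pvRank card)
          if hh && (val == 1) then d.insert 14 card else d.insert val card)
        = (fun (d : PySem.Dict Int (List (String × String))) card => d.insert (key card) card) := by
      funext d card
      simp only [hkey]
      split <;> rfl
    rw [hfold]
    set d := normal.foldl (fun d card => d.insert (key card) card) PySem.Dict.empty with hd
    have hnodup : d.keys.Nodup := by
      rw [hd]
      exact PySem.Dict.nodup_keys_foldl_insert_key normal key (fun _ c => c) PySem.Dict.empty
        PySem.Dict.nodup_keys_empty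
    -- the dict is nonempty
    have hne : d.items ≠ [] := by
      intro h0
      have hk0 : d.keys = [] := by simp only [PySem.Dict.keys, h0]; rfl
      obtain ⟨c0, t, hc0⟩ := List.exists_cons_of_ne_nil hn
      have : key c0 ∈ d.keys := by
        rw [hd, PySem.Dict.keys_foldl_insert_key]
        have : key c0 ∈ normal.map key := by rw [hc0]; simp
        exact (PySem.Set.mem_ofList _ _).mpr this
      rw [hk0] at this
      exact absurd this (List.not_mem_nil)
    set sortedItems := PySem.List.sorted d.items (fun kv => kv.1) false with hsi
    have hSne : sortedItems ≠ [] := by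
      rw [hsi, Ne, PySem.List.sorted_eq_nil_iff]; exact hne
    obtain ⟨⟨k0, c0⟩, rest, hS⟩ : ∃ kc rest, sortedItems = kc :: rest := by
      cases hS : sortedItems with
      | nil => exact absurd hS hSne
      | cons a b => exact ⟨a, b, rfl⟩
    set ys := sortedItems.map (fun kv : Int × List (String × String) => kv.1) with hys
    have hperm : ys.Perm d.keys := by
      rw [hys]
      have := (PySem.List.sorted_perm (xs := d.items) (key := fun kv => kv.1) (rev := false)).map
        (fun kv : Int × List (String × String) => kv.1)
      simpa [PySem.Dict.keys] using this
    have hysnd : ys.Nodup := hperm.nodup_iff.mpr hnodup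
    have hyslt : ys.Pairwise (· < ·) :=
      pairwise_lt_of_le_nodup ys
        (hys ▸ PySem.List.sorted_map_key_pairwise d.items (fun kv => kv.1)) hysnd
    have hsv : PySem.List.sorted d.keys (fun x => x) false = ys :=
      PySem.List.sorted_eq_of_perm_of_pairwise_lt _ _ _ hperm hyslt
    rw [hsv]
    have hysc : ys = k0 :: rest.map (fun kv => kv.1) := by rw [hys, hS, List.map_cons]
    -- dict lookups along the sorted items
    have hget : ∀ pv ∈ sortedItems, d.get? pv.1 = some pv.2 := by
      intro pv hpv
      obtain ⟨a, b⟩ := pv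
      exact PySem.Dict.get?_of_mem_items d ((PySem.List.mem_sorted _ _ _ _).mp hpv) hnodup
    have hcontains : ∀ p : Int, d.contains p = decide (p ∈ ys) := by
      intro p
      rw [PySem.Dict.contains_eq_decide_mem_keys, decide_eq_decide]
      exact (hperm.mem_iff).symm
    -- sorted_values[0] and sorted_values[-1]
    rw [hysc]
    rw [PySem.List.pyGetD_zero_cons]
    have hlast : PySem.List.pyGetD (k0 :: rest.map (fun kv => kv.1)) (-1) 0
        = (rest.map (fun kv => kv.1)).getLastD k0 := by
      rw [PySem.List.pyGetD_neg_one _ 0 (by simp)]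
      exact List.getLast_eq_getLastD _
    rw [hlast]
    set L := (rest.map (fun kv => kv.1)).getLastD k0 with hLdef
    have hsortk : (k0 :: rest.map (fun kv => kv.1)).Pairwise (· < ·) := hysc ▸ hyslt
    have hk0L : k0 ≤ L :=
      le_getLastD _ _ (fun x hx => le_of_lt ((List.pairwise_cons.mp hsortk).1 x hx))
    rw [PySem.List.pyRange_one_cons (by omega : k0 < L + 1), List.foldl_cons]
    have hconk0 : d.contains k0 = true := by
      rw [hcontains k0, hysc]; simp
    have hgetk0 : d.getD k0 [] = c0 := by
      have h := hget (k0, c0) (by rw [hS]; exact List.mem_cons_self ..)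
      simp [PySem.Dict.getD_eq_get?_getD, h]
    rw [show pvStepA d jokers ([], 0) k0 = ([c0], 0) by simp [pvStepA, hconk0, hgetk0]]
    have hmain := loop_eq d jokers rest k0 [c0] 0 (by omega) hsortk
      (fun pv hpv => hget pv (by rw [hS]; exact List.mem_cons_of_mem _ hpv))
      (fun p hp => by
        rw [hcontains p, hysc, decide_eq_decide, List.mem_cons]
        exact ⟨fun h => h.resolve_left (by omega), Or.inr⟩)
    simp only [List.drop_zero] at hmain
    rw [hS]
    show pvWhileJokers jokers _ _ = pvBLoop rest k0 jokers [c0]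
    rw [whileJokers_eq jokers]
    exact hmain
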